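-- pv_equiv track=rewrite | github.com/pdecks/airbnb-warmup | warmup6_alt.py | check_suffix_similarity
-- ===== SOURCE A (Python) =====
-- def check_suffix_similarity(string):
--     # walk through all suffixes, starting with full string
--     i = 0
--     sum_counts = 0
--     while i < len(string):
--         curr_suffix = string[i:]
--         sum_counts += compare_strings(string, curr_suffix)
--         i += 1
--     #print sum_counts
--     return sum_counts
--
-- def compare_strings(string1, string2):
--     if len(string2) > len(string1):
--         raise IndexError('Length of string2 must be less than or equal to length of string1.')
--     count = 0
--     # walk through strings simultaneously, break when characters differ
--     j = 0
--     while j < len(string2):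
--         if string2[j] == string1[j]:
--             count += 1
--             j += 1
--         else:
--             return count
--     return count
-- ===== SOURCE B (Python) =====
-- def check_suffix_similarity(string):
--     # Column-wise survivor scan: keep only the suffix start positions whose
--     # character-by-character match with the prefix is still alive; each round
--     # extends all live matches by one character at once.
--     n = len(string)
--     active = list(range(n))
--     total = 0
--     k = 0
--     while active:
--         active = [i for i in active if i + k < n and string[i + k] == string[k]]
--         total += len(active)
--         k += 1
--     return total
-- ===== Notes on version B (the rewrite author's own statement) =====
-- stated objective: alternative
-- what changed: B replaces A's per-suffix rescan (compare each suffix to the prefix from scratch) by a single column-wise pass that keeps the list of still-matching suffix start positions and extends all live matches one character per round, adding the survivor count each round.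
import Mathlib
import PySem

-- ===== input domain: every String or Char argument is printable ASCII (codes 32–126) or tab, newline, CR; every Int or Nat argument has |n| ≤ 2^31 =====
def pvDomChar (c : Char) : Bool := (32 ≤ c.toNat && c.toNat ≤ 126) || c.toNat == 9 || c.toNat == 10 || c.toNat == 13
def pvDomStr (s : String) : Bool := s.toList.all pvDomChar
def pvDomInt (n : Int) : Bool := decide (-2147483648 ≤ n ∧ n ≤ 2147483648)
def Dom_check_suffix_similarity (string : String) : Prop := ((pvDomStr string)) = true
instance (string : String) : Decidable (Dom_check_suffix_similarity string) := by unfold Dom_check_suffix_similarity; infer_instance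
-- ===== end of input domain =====

-- B replaces A's per-suffix rescans by one column-wise pass that keeps the set of
-- still-matching suffix starts (alternative decomposition; same exact result).

-- ===== PORT A =====
-- inner while loop of compare_strings: j, count
def cmpLoop (s1 s2 : List Char) (j : Nat) (count : Int) : Int :=
  if j < s2.length then
    if s2[j]? = s1[j]? then cmpLoop s1 s2 (j + 1) (count + 1)
    else count
  else count
termination_by s2.length - j

def compareStrings (s1 s2 : List Char) : Int :=
  -- Python raises IndexError in this branch; it is unreachable from
  -- check_suffix_similarity (a suffix is never longer than the string), so the value is irrelevant
  if s2.length > s1.length then 0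
  else cmpLoop s1 s2 0 0

-- outer while loop: i, sum_counts; string[i:] with 0 ≤ i is List.drop i
def aLoop (s : List Char) (i : Nat) (sum_counts : Int) : Int :=
  if i < s.length then
    aLoop s (i + 1) (sum_counts + compareStrings s (s.drop i))
  else sum_counts
termination_by s.length - i

def check_suffix_similarity (string : String) : Int :=
  aLoop string.toList 0 0

-- ===== PORT B =====
-- while active: filter survivors, add their number; fuel n+1 bounds the loop
-- (position 0 dies once k = n, so the active list is empty after at most n+1 rounds)
def bLoop (s : List Char) (n : Nat) (active : List Nat) (total : Int) (k fuel : Nat) : Int :=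
  match fuel with
  | 0 => total
  | fuel' + 1 =>
    if active.isEmpty then total
    else
      let active' := active.filter (fun i => decide (i + k < n) && (s[i + k]? == s[k]?))
      bLoop s n active' (total + active'.length) (k + 1) fuel'

def check_suffix_similarity_alt (string : String) : Int :=
  let s := string.toList
  let n := s.length
  bLoop s n (List.range n) 0 0 (n + 1)

-- ===== PRECONDITION & SPEC =====
def Spec_check_suffix_similarity (string : String) (out : Int) : Prop := out = check_suffix_similarity_alt string
instance (string : String) (out : Int) : Decidable (Spec_check_suffix_similarity string out) := by unfold Spec_check_suffix_similarity; infer_instance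

-- ===== CLAIM (what is proved, stated in full; the proofs are below) =====
def Claim_equal_check_suffix_similarity : Prop := ∀ (string : String), Dom_check_suffix_similarity string → Spec_check_suffix_similarity string (check_suffix_similarity string)

-- ===== LEMMAS AND PROOFS =====

/-- length of the longest common prefix of two lists -/
def lcpN : List Char → List Char → Nat
  | a :: as, b :: bs => if a = b then lcpN as bs + 1 else 0
  | _, _ => 0

theorem lcpN_nil_right (a : List Char) : lcpN a [] = 0 := by
  cases a <;> rfl

theorem lcpN_le_right : ∀ (a b : List Char), lcpN a b ≤ b.length := by
  intro a b
  induction a generalizing b with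
  | nil => cases b <;> simp [lcpN]
  | cons x as ih =>
    cases b with
    | nil => simp [lcpN]
    | cons y bs =>
      by_cases h : x = y <;> simp [lcpN, h]
      exact ih bs

/-- one-step extension of a common prefix, phrased like B's filter condition -/
theorem lcpN_succ_iff : ∀ (k : Nat) (a b : List Char),
    (k + 1 ≤ lcpN a b) ↔ (k ≤ lcpN a b ∧ b[k]? ≠ none ∧ b[k]? = a[k]?) := by
  intro k
  induction k with
  | zero =>
    intro a b
    cases a with
    | nil => cases b <;> simp [lcpN]
    | cons x as =>
      cases b with
      | nil => simp [lcpN]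
      | cons y bs =>
        by_cases h : x = y
        · simp [lcpN, h]
        · simp only [lcpN, if_neg h]
          simp
          intro h'
          exact h h'.symm
  | succ k ih =>
    intro a b
    cases a with
    | nil => cases b <;> simp [lcpN]
    | cons x as =>
      cases b with
      | nil => simp [lcpN]
      | cons y bs =>
        by_cases h : x = y
        · simp [lcpN, h, ih as bs]
        · simp only [lcpN, if_neg h]
          simp

theorem cmpLoop_eq (s1 s2 : List Char) (j : Nat) (count : Int)
    (h : s2.length ≤ s1.length) :
    cmpLoop s1 s2 j count = count + lcpN (s1.drop j) (s2.drop j) := by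
  fun_induction cmpLoop s1 s2 j count with
  | case1 j count hj heq ih =>
    have hj1 : j < s1.length := lt_of_lt_of_le hj h
    rw [List.drop_eq_getElem_cons hj1, List.drop_eq_getElem_cons hj]
    have hch : s1[j] = s2[j] := by
      have h1 : s1[j]? = some s1[j] := List.getElem?_eq_getElem hj1
      have h2 : s2[j]? = some s2[j] := List.getElem?_eq_getElem hj
      rw [h1, h2] at heq
      exact (Option.some.inj heq).symm
    rw [ih]
    simp [lcpN, hch]
    ring
  | case2 j count hj hne =>
    have hj1 : j < s1.length := lt_of_lt_of_le hj h
    rw [List.drop_eq_getElem_cons hj1, List.drop_eq_getElem_cons hj]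
    have hch : ¬ s1[j] = s2[j] := by
      intro hc
      apply hne
      rw [List.getElem?_eq_getElem hj1, List.getElem?_eq_getElem hj, hc]
    simp only [lcpN, if_neg hch]
    simp
  | case3 j count hj =>
    rw [show List.drop j s2 = [] from List.drop_of_length_le (by omega)]
    simp [lcpN_nil_right]

theorem compareStrings_suffix (s : List Char) (i : Nat) :
    compareStrings s (s.drop i) = lcpN s (s.drop i) := by
  unfold compareStrings
  have hlen : (s.drop i).length ≤ s.length := by
    simp
  rw [if_neg (by omega)]
  rw [cmpLoop_eq _ _ _ _ hlen]
  simp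

theorem aLoop_eq (s : List Char) (i : Nat) (acc : Int) :
    aLoop s i acc
      = acc + ((List.range' i (s.length - i)).map (fun t => (lcpN s (s.drop t) : Int))).sum := by
  fun_induction aLoop s i acc with
  | case1 i acc hi ih =>
    have hn : s.length - i = (s.length - (i + 1)) + 1 := by omega
    rw [hn, List.range'_succ]
    rw [ih, compareStrings_suffix]
    simp
    ring
  | case2 i acc hi =>
    have hn : s.length - i = 0 := by omega
    simp [hn]

/-- survivors after k successful rounds -/
def surv (s : List Char) (k : Nat) : List Nat :=
  (List.range s.length).filter (fun i => decide (k ≤ lcpN s (s.drop i)))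

theorem surv_zero (s : List Char) : surv s 0 = List.range s.length := by
  simp [surv]

theorem surv_step (s : List Char) (k : Nat) :
    (surv s k).filter (fun i => decide (i + k < s.length) && (s[i + k]? == s[k]?))
      = surv s (k + 1) := by
  unfold surv
  rw [List.filter_filter]
  apply List.filter_congr
  intro i _
  rw [Bool.eq_iff_iff]
  simp only [Bool.and_eq_true, decide_eq_true_eq, beq_iff_eq]
  constructor
  · rintro ⟨⟨h2, h3⟩, h1⟩
    refine (lcpN_succ_iff k s (s.drop i)).mpr ⟨h1, ?_, ?_⟩
    · rw [List.getElem?_drop]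
      simp
      omega
    · rw [List.getElem?_drop]
      exact h3
  · intro h1
    have hh := (lcpN_succ_iff k s (s.drop i)).mp h1
    rw [List.getElem?_drop] at hh
    refine ⟨⟨?_, hh.2.2⟩, hh.1⟩
    have := hh.2.1
    simp at this
    omega

theorem surv_len_bound (s : List Char) (k : Nat) (hne : surv s k ≠ []) : k ≤ s.length := by
  rcases List.exists_mem_of_ne_nil _ hne with ⟨i, hi⟩
  unfold surv at hi
  rw [List.mem_filter] at hi
  have h1 := lcpN_le_right s (s.drop i)
  have h2 : (s.drop i).length ≤ s.length := by simp
  have := of_decide_eq_true hi.2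
  omega

theorem surv_empty_mono (s : List Char) (k j : Nat) (hk : k ≤ j) (h : surv s k = []) :
    surv s j = [] := by
  unfold surv at *
  rw [List.filter_eq_nil_iff] at *
  intro i hi
  have := h i hi
  simp at this ⊢
  omega

theorem bLoop_eq (s : List Char) : ∀ (fuel k : Nat) (total : Int),
    s.length + 1 ≤ k + fuel →
    bLoop s s.length (surv s k) total k fuel
      = total + (((List.range' (k + 1) (s.length + 1 - k)).map (fun j => (surv s j).length)).sum : Nat) := by
  intro fuel
  induction fuel with
  | zero =>
    intro k total h
    have : s.length + 1 - k = 0 := by omega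
    simp [bLoop, this]
  | succ fuel ih =>
    intro k total h
    rw [bLoop]
    by_cases he : (surv s k).isEmpty
    · rw [if_pos he]
      have hnil : surv s k = [] := List.isEmpty_iff.mp he
      have hz : (((List.range' (k + 1) (s.length + 1 - k)).map (fun j => (surv s j).length)).sum : Nat) = 0 := by
        apply List.sum_eq_zero
        intro x hx
        rw [List.mem_map] at hx
        rcases hx with ⟨j, hj, rfl⟩
        rw [List.mem_range'_1] at hj
        rw [surv_empty_mono s k j (by omega) hnil]
        rfl
      simp [hz]
    · rw [if_neg he]
      have hne : surv s k ≠ [] := fun hh => he (by simp [hh])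
      have hk : k ≤ s.length := surv_len_bound s k hne
      rw [surv_step]
      rw [ih (k + 1) (total + ((surv s (k + 1)).length : Int)) (by omega)]
      have hsplit : s.length + 1 - k = (s.length - k) + 1 := by omega
      rw [hsplit, List.range'_succ]
      have : s.length + 1 - (k + 1) = s.length - k := by omega
      rw [this]
      simp
      ring

/-- Σ over a list of an `if ≤` indicator -/
theorem sum_indicator (v : Nat) : ∀ (K : Nat),
    ((List.range' 1 K).map (fun j => if j ≤ v then 1 else 0)).sum = min v K := by
  intro K
  induction K with
  | zero => simp
  | succ K ih =>
    rw [List.range'_concat]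
    simp [ih]
    split_ifs <;> omega

theorem list_sum_map_add (A B : Nat → Nat) : ∀ (l : List Nat),
    (l.map (fun j => A j + B j)).sum = (l.map A).sum + (l.map B).sum := by
  intro l
  induction l with
  | nil => simp
  | cons a l ih => simp [ih]; ring

/-- layer-cake: sum of values = sum over thresholds of counts -/
theorem layer_cake (f : Nat → Nat) : ∀ (m K : Nat), (∀ i, i < m → f i ≤ K) →
    ((List.range m).map f).sum
      = ((List.range' 1 K).map (fun j => ((List.range m).filter (fun i => decide (j ≤ f i))).length)).sum := by
  intro m
  induction m with
  | zero => simp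
  | succ m ih =>
    intro K hK
    rw [List.range_succ]
    simp only [List.map_append, List.sum_append, List.filter_append, List.length_append]
    rw [list_sum_map_add (fun j => ((List.range m).filter (fun i => decide (j ≤ f i))).length)
          (fun j => (([m]).filter (fun i => decide (j ≤ f i))).length)]
    rw [ih K (fun i hi => hK i (by omega))]
    congr 1
    have hone : (fun j => (([m]).filter (fun i => decide (j ≤ f i))).length)
        = (fun j => if j ≤ f m then 1 else 0) := by
      funext j
      by_cases h : j ≤ f m <;> simp [List.filter, h]
    rw [hone, sum_indicator]
    have := hK m (by omega)
    simp
    omega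

theorem cast_sum_map (g : Nat → Nat) (l : List Nat) :
    ((l.map (fun t => (g t : Int))).sum) = ((l.map g).sum : Nat) := by
  induction l with
  | nil => simp
  | cons a l ih => simp [ih]

-- ===== VERDICT (by name: the statement is the Claim_ definition above) =====
theorem check_suffix_similarity_spec : Claim_equal_check_suffix_similarity := by
  intro string _
  unfold Spec_check_suffix_similarity check_suffix_similarity check_suffix_similarity_alt
  set s := string.toList with hs
  show aLoop s 0 0 = bLoop s s.length (List.range s.length) 0 0 (s.length + 1)
  rw [aLoop_eq, ← surv_zero s, bLoop_eq s (s.length + 1) 0 0 (by omega)]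
  simp only [Nat.sub_zero, zero_add]
  rw [show List.range' 0 s.length = List.range s.length from (List.range_eq_range' (n := s.length)).symm]
  rw [cast_sum_map]
  have hf : ∀ i, i < s.length → lcpN s (s.drop i) ≤ s.length + 1 := by
    intro i hi
    have h1 := lcpN_le_right s (s.drop i)
    have h2 : (s.drop i).length ≤ s.length := by simp
    omega
  rw [layer_cake (fun i => lcpN s (s.drop i)) s.length (s.length + 1) hf]
  unfold surv
  norm_num
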